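-- pv_equiv track=rewrite | github.com/madshoffnielsen/AdventOfCode | 2020/code/day12.py | navigate_part2
-- ===== SOURCE A (Python) =====
-- from typing import List, Tuple
--
-- Instruction = Tuple[str, int]
--
-- def rotate(x: int, y: int, degrees: int) -> Tuple[int, int]:
--     """Rotate point (x,y) around origin by degrees."""
--     for _ in range((degrees % 360) // 90):
--         x, y = -y, x
--     return x, y
--
-- def navigate_part2(instructions: List[Instruction]) -> int:
--     """Navigate ship using waypoint instructions."""
--     ship_x, ship_y = 0, 0
--     waypoint_x, waypoint_y = 10, 1  # Waypoint starts 10 east, 1 north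
--
--     for action, value in instructions:
--         match action:
--             case 'N': waypoint_y += value
--             case 'S': waypoint_y -= value
--             case 'E': waypoint_x += value
--             case 'W': waypoint_x -= value
--             case 'L': waypoint_x, waypoint_y = rotate(waypoint_x, waypoint_y, value)
--             case 'R': waypoint_x, waypoint_y = rotate(waypoint_x, waypoint_y, -value)
--             case 'F':
--                 ship_x += waypoint_x * value
--                 ship_y += waypoint_y * value
--
--     return abs(ship_x) + abs(ship_y)
-- ===== SOURCE B (Python) =====
-- # Different algorithm: instead of simulating the state forward, scan the
-- # instructions BACK-TO-FRONT and compose the affine effect of the whole list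
-- # (ship += M*w + c ; w := R*w + t), then apply it once to the initial state.
-- ROT = ((1, 0, 0, 1), (0, -1, 1, 0), (-1, 0, 0, -1), (0, 1, -1, 0))  # quarter-turn matrices
--
--
-- def navigate_part2(instructions):
--     m00, m01, m10, m11 = 0, 0, 0, 0      # M: ship displacement per waypoint
--     c0, c1 = 0, 0                        # c: fixed ship displacement
--     r00, r01, r10, r11 = 1, 0, 0, 1      # R: net rotation applied to waypoint
--     t0, t1 = 0, 0                        # t: fixed waypoint translation
--     for action, value in reversed(instructions):
--         if action in ('N', 'S', 'E', 'W'):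
--             d0, d1 = {'N': (0, value), 'S': (0, -value),
--                       'E': (value, 0), 'W': (-value, 0)}[action]
--             c0 += m00 * d0 + m01 * d1
--             c1 += m10 * d0 + m11 * d1
--             t0 += r00 * d0 + r01 * d1
--             t1 += r10 * d0 + r11 * d1
--         elif action in ('L', 'R'):
--             k = ((value if action == 'L' else -value) % 360) // 90
--             q00, q01, q10, q11 = ROT[k]
--             m00, m01, m10, m11 = (m00 * q00 + m01 * q10, m00 * q01 + m01 * q11,
--                                   m10 * q00 + m11 * q10, m10 * q01 + m11 * q11)
--             r00, r01, r10, r11 = (r00 * q00 + r01 * q10, r00 * q01 + r01 * q11,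
--                                   r10 * q00 + r11 * q10, r10 * q01 + r11 * q11)
--         elif action == 'F':
--             m00 += value
--             m11 += value
--     x = m00 * 10 + m01 * 1 + c0
--     y = m10 * 10 + m11 * 1 + c1
--     return abs(x) + abs(y)
-- ===== Notes on version B (the rewrite author's own statement) =====
-- stated objective: alternative
-- what changed: B scans the instructions back-to-front and composes the whole list's affine effect (ship += M*w + c; w := R*w + t) as 2x2 integer matrices plus translation vectors, applying it once to the initial state, instead of A's forward state simulation with a repeated-90-degree rotate loop.
import Mathlib
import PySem

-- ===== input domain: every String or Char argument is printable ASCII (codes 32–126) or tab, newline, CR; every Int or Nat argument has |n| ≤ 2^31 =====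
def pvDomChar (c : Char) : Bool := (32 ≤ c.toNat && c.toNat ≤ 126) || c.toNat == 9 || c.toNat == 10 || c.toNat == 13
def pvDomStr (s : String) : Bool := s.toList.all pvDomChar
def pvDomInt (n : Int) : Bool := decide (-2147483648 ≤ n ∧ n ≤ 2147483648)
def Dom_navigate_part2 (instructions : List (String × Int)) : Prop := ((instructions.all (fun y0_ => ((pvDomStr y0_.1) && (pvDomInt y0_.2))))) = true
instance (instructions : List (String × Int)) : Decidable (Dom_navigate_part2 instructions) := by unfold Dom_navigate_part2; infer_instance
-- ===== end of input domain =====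

-- B scans the instructions back-to-front, composing the affine effect of the whole
-- list (ship += M*w + c ; w := R*w + t) and applying it once to the initial state,
-- instead of A's forward state simulation (alternative algorithm, same O(n) cost).

-- ===== PORT A =====
-- rotate(x, y, degrees): loop (degrees % 360) // 90 times doing (x, y) = (-y, x)
def rotateA (x y degrees : Int) : Int × Int :=
  (PySem.List.pyRange 0 (PySem.Int.floordiv (PySem.Int.mod degrees 360) 90) 1).foldl
    (fun p _ => (-p.2, p.1)) (x, y)

-- one iteration of A's loop over (ship_x, ship_y, waypoint_x, waypoint_y)
def stepA (st : Int × Int × Int × Int) (av : String × Int) : Int × Int × Int × Int :=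
  let sx := st.1; let sy := st.2.1; let wx := st.2.2.1; let wy := st.2.2.2
  let action := av.1; let value := av.2
  if action = "N" then (sx, sy, wx, wy + value)
  else if action = "S" then (sx, sy, wx, wy - value)
  else if action = "E" then (sx, sy, wx + value, wy)
  else if action = "W" then (sx, sy, wx - value, wy)
  else if action = "L" then
    let p := rotateA wx wy value; (sx, sy, p.1, p.2)
  else if action = "R" then
    let p := rotateA wx wy (-value); (sx, sy, p.1, p.2)
  else if action = "F" then (sx + wx * value, sy + wy * value, wx, wy)
  else (sx, sy, wx, wy)

def navigate_part2 (instructions : List (String × Int)) : Int :=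
  let st := instructions.foldl stepA (0, 0, 10, 1)
  |st.1| + |st.2.1|

-- ===== PORT B =====
-- quarter-turn matrices ROT (row-major (q00, q01, q10, q11))
def rotTable : List (Int × Int × Int × Int) :=
  [(1, 0, 0, 1), (0, -1, 1, 0), (-1, 0, 0, -1), (0, 1, -1, 0)]

-- the affine effect of an instruction suffix: ship += M*w + c ; w := R*w + t
structure Eff where
  m00 : Int
  m01 : Int
  m10 : Int
  m11 : Int
  c0 : Int
  c1 : Int
  r00 : Int
  r01 : Int
  r10 : Int
  r11 : Int
  t0 : Int
  t1 : Int
deriving Repr, DecidableEq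

-- prepend one instruction to the composed effect (Source B's loop body)
def stepB (e : Eff) (av : String × Int) : Eff :=
  let action := av.1; let value := av.2
  if action = "N" ∨ action = "S" ∨ action = "E" ∨ action = "W" then
    -- the dict-literal lookup in Source B: first (unique) matching key
    let d : Int × Int :=
      if action = "N" then (0, value) else if action = "S" then (0, -value)
      else if action = "E" then (value, 0) else (-value, 0)
    { e with c0 := e.c0 + (e.m00 * d.1 + e.m01 * d.2),
             c1 := e.c1 + (e.m10 * d.1 + e.m11 * d.2),
             t0 := e.t0 + (e.r00 * d.1 + e.r01 * d.2),
             t1 := e.t1 + (e.r10 * d.1 + e.r11 * d.2) }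
  else if action = "L" ∨ action = "R" then
    let k := PySem.Int.floordiv
      (PySem.Int.mod (if action = "L" then value else -value) 360) 90
    -- ROT[k]: k is always in 0..3, so the default is unreachable
    let q := PySem.List.pyGetD rotTable k (0, 0, 0, 0)
    { e with m00 := e.m00 * q.1 + e.m01 * q.2.2.1, m01 := e.m00 * q.2.1 + e.m01 * q.2.2.2,
             m10 := e.m10 * q.1 + e.m11 * q.2.2.1, m11 := e.m10 * q.2.1 + e.m11 * q.2.2.2,
             r00 := e.r00 * q.1 + e.r01 * q.2.2.1, r01 := e.r00 * q.2.1 + e.r01 * q.2.2.2,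
             r10 := e.r10 * q.1 + e.r11 * q.2.2.1, r11 := e.r10 * q.2.1 + e.r11 * q.2.2.2 }
  else if action = "F" then
    { e with m00 := e.m00 + value, m11 := e.m11 + value }
  else e

def effId : Eff := ⟨0, 0, 0, 0, 0, 0, 1, 0, 0, 1, 0, 0⟩

def navigate_part2_alt (instructions : List (String × Int)) : Int :=
  let e := instructions.reverse.foldl stepB effId
  let x := e.m00 * 10 + e.m01 * 1 + e.c0
  let y := e.m10 * 10 + e.m11 * 1 + e.c1
  |x| + |y|

-- ===== PRECONDITION & SPEC =====
def Spec_navigate_part2 (instructions : List (String × Int)) (out : Int) : Prop := out = navigate_part2_alt instructions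
instance (instructions : List (String × Int)) (out : Int) : Decidable (Spec_navigate_part2 instructions out) := by unfold Spec_navigate_part2; infer_instance

-- ===== CLAIM (what is proved, stated in full; the proofs are below) =====
def Claim_equal_navigate_part2 : Prop := ∀ (instructions : List (String × Int)), Dom_navigate_part2 instructions → Spec_navigate_part2 instructions (navigate_part2 instructions)

-- ===== LEMMAS AND PROOFS =====

-- applying a composed effect to a concrete state
def applyEff (e : Eff) (st : Int × Int × Int × Int) : Int × Int × Int × Int :=
  (st.1 + (e.m00 * st.2.2.1 + e.m01 * st.2.2.2) + e.c0,
   st.2.1 + (e.m10 * st.2.2.1 + e.m11 * st.2.2.2) + e.c1,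
   e.r00 * st.2.2.1 + e.r01 * st.2.2.2 + e.t0,
   e.r10 * st.2.2.1 + e.r11 * st.2.2.2 + e.t1)

-- A's rotate loop is multiplication by the quarter-turn matrix ROT[(d % 360) // 90]
theorem rotateA_eq (x y d : Int) :
    rotateA x y d =
      (let q := PySem.List.pyGetD rotTable
          (PySem.Int.floordiv (PySem.Int.mod d 360) 90) (0, 0, 0, 0)
       (q.1 * x + q.2.1 * y, q.2.2.1 * x + q.2.2.2 * y)) := by
  have h0 : (0 : Int) ≤ PySem.Int.mod d 360 := PySem.Int.mod_nonneg d (by norm_num)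
  have h1 : PySem.Int.mod d 360 < 360 := PySem.Int.mod_lt d (by norm_num)
  set m := PySem.Int.mod d 360 with hm
  have key : ∀ k : Int, 0 ≤ k → k < 4 →
      (PySem.List.pyRange 0 k 1).foldl (fun (p : Int × Int) _ => (-p.2, p.1)) (x, y) =
        (let q := PySem.List.pyGetD rotTable k (0, 0, 0, 0)
         (q.1 * x + q.2.1 * y, q.2.2.1 * x + q.2.2.2 * y)) := by
    intro k hk0 hk1
    interval_cases k <;>
      simp [rotTable, PySem.List.pyGetD, PySem.List.pyIdx?, PySem.List.pyGet?,
        PySem.List.pyRange_one, List.range_succ]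
  have hk0 : (0 : Int) ≤ PySem.Int.floordiv m 90 := by
    rw [PySem.Int.le_floordiv_iff_mul_le (by norm_num)]; omega
  have hk1 : PySem.Int.floordiv m 90 < 4 := by
    rw [PySem.Int.floordiv_lt_iff_lt_mul (by norm_num)]; omega
  unfold rotateA
  exact key _ hk0 hk1

-- prepending an instruction to the composed effect = composing with A's step
theorem applyEff_stepB (e : Eff) (av : String × Int) (st : Int × Int × Int × Int) :
    applyEff (stepB e av) st = applyEff e (stepA st av) := by
  obtain ⟨a, v⟩ := av
  by_cases hN : a = "N"
  · subst hN
    simp only [stepB, stepA, applyEff, reduceIte, Prod.mk.injEq, true_or,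
      if_true, String.reduceEq]
    exact ⟨by ring, by ring, by ring, by ring⟩
  by_cases hS : a = "S"
  · subst hS
    simp only [stepB, stepA, applyEff, Prod.mk.injEq, or_true,
      if_true, String.reduceEq, if_false, or_false]
    exact ⟨by ring, by ring, by ring, by ring⟩
  by_cases hE : a = "E"
  · subst hE
    simp only [stepB, stepA, applyEff, Prod.mk.injEq, or_true,
      if_true, String.reduceEq, if_false, or_false]
    exact ⟨by ring, by ring, by ring, by ring⟩
  by_cases hW : a = "W"
  · subst hW
    simp only [stepB, stepA, applyEff, Prod.mk.injEq, or_true,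
      if_true, String.reduceEq, if_false, or_false]
    exact ⟨by ring, by ring, by ring, by ring⟩
  by_cases hL : a = "L"
  · subst hL
    simp only [stepB, stepA, applyEff, Prod.mk.injEq,
      if_true, String.reduceEq, if_false, or_false, rotateA_eq]
    exact ⟨by ring, by ring, by ring, by ring⟩
  by_cases hR : a = "R"
  · subst hR
    simp only [stepB, stepA, applyEff, Prod.mk.injEq, or_true,
      if_true, String.reduceEq, if_false, or_false, rotateA_eq]
    exact ⟨by ring, by ring, by ring, by ring⟩
  by_cases hF : a = "F"
  · subst hF
    simp only [stepB, stepA, applyEff, Prod.mk.injEq, if_true, String.reduceEq,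
      if_false, or_self]
    exact ⟨by ring, by ring, trivial⟩
  simp only [stepB, stepA, applyEff, hN, hS, hE, hW, hL, hR, hF, if_false, or_self]

-- forward simulation = back-to-front composed effect, applied to the start state
theorem fold_eq (l : List (String × Int)) :
    ∀ st : Int × Int × Int × Int,
      l.foldl stepA st = applyEff (l.reverse.foldl stepB effId) st := by
  induction l with
  | nil =>
    intro st
    obtain ⟨a, b, c, d⟩ := st
    simp only [List.foldl_nil, List.reverse_nil, applyEff, effId, Prod.mk.injEq]
    exact ⟨by ring, by ring, by ring, by ring⟩
  | cons a t ih =>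
    intro st
    have : (a :: t).reverse.foldl stepB effId
        = stepB (t.reverse.foldl stepB effId) a := by
      simp [List.reverse_cons]
    rw [List.foldl_cons, ih (stepA st a), this, applyEff_stepB]

-- ===== VERDICT (by name: the statement is the Claim_ definition above) =====
theorem navigate_part2_spec : Claim_equal_navigate_part2 := by
  intro ins _
  unfold Spec_navigate_part2 navigate_part2 navigate_part2_alt
  rw [fold_eq]
  simp [applyEff]
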